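-- pv_equiv track=rewrite | github.com/Workwrite-Niidome/voynich-manuscript-analysis | homophone_collapse_v2.py | tokenize_eva
-- ===== SOURCE A (Python) =====
-- def tokenize_eva(word):
--     """Tokenize EVA word into multi-character tokens.
--     EVA uses digraphs like 'ch', 'sh', 'ii', 'ee', 'ai', 'ck', etc.
--     """
--     tokens = []
--     i = 0
--     while i < len(word):
--         # Try trigraphs first
--         if i + 2 < len(word):
--             tri = word[i:i+3]
--             if tri in ('iii', 'iin', 'eee', 'ees', 'eed', 'eel'):
--                 # Handle iii as ii + i, iin as ii + n, etc.
--                 pass  # fall through to digraphs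
--
--         # Digraphs
--         if i + 1 < len(word):
--             di = word[i:i+2]
--             if di in ('ch', 'sh', 'ck', 'ph', 'cf', 'ct', 'ii', 'ee',
--                        'ai', 'ei', 'oi', 'cp', 'qo', 'ot', 'ol', 'or',
--                        'ar', 'an', 'in', 'dy', 'ky', 'ty', 'sy', 'ry',
--                        'th', 'fh'):
--                 tokens.append(di)
--                 i += 2
--                 continue
--
--         tokens.append(word[i])
--         i += 1
--     return tokens
-- ===== SOURCE B (Python) =====
-- DIGRAPHS = frozenset(('ch', 'sh', 'ck', 'ph', 'cf', 'ct', 'ii', 'ee',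
--                       'ai', 'ei', 'oi', 'cp', 'qo', 'ot', 'ol', 'or',
--                       'ar', 'an', 'in', 'dy', 'ky', 'ty', 'sy', 'ry',
--                       'th', 'fh'))
--
-- def tokenize_eva(word):
--     """Tokenize EVA word into multi-character tokens (iterator-driven greedy scan)."""
--     tokens = []
--     it = iter(word)
--     prev = next(it, None)
--     while prev is not None:
--         cur = next(it, None)
--         if cur is not None and prev + cur in DIGRAPHS:
--             tokens.append(prev + cur)
--             prev = next(it, None)
--         else:
--             tokens.append(prev)
--             prev = cur
--     return tokens
-- ===== Notes on version B (the rewrite author's own statement) =====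
-- stated objective: simpler
-- what changed: Replaced A's index-based while loop with per-step string slicing (and a dead trigraph block) by an iterator-driven scan that carries a single lookahead character and tests digraphs against a precomputed frozenset.
import Mathlib
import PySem

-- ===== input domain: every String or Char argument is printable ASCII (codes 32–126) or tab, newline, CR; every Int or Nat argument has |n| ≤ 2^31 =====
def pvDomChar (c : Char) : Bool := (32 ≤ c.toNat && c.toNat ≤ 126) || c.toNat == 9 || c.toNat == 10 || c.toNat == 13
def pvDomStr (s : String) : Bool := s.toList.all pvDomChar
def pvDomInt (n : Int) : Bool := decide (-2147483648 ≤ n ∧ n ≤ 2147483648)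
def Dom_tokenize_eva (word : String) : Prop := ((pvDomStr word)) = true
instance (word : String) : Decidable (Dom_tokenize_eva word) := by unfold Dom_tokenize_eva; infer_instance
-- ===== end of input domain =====

-- B replaces A's index/slice while-loop with an iterator-driven scan carrying one
-- lookahead character (objective: simpler — no indices, no slicing, no dead trigraph block).

-- the digraph table both versions consult (same literals as the Python tuple/set)
def evaDigraphs : List String :=
  ["ch", "sh", "ck", "ph", "cf", "ct", "ii", "ee",
   "ai", "ei", "oi", "cp", "qo", "ot", "ol", "or",
   "ar", "an", "in", "dy", "ky", "ty", "sy", "ry",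
   "th", "fh"]

-- ===== PORT A =====
-- A's while-loop over index i; the trigraph block in A computes `tri`, tests membership
-- and does `pass` — a no-op, so it contributes nothing and is not transcribed.
def tokenizeAux (w : List Char) (i : Nat) (tokens : List String) : List String :=
  if h : i < w.length then
    if i + 1 < w.length ∧ String.ofList ((w.drop i).take 2) ∈ evaDigraphs then
      tokenizeAux w (i + 2) (tokens ++ [String.ofList ((w.drop i).take 2)])
    else
      tokenizeAux w (i + 1) (tokens ++ [String.ofList [w[i]]])
  else tokens
termination_by w.length - i

def tokenize_eva (word : String) : List String :=
  tokenizeAux word.toList 0 []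

-- ===== PORT B =====
-- B's loop state: `prev` (the pending character, none = iterator exhausted) and the
-- not-yet-consumed rest of the iterator.
def tokenizeGo : Option Char → List Char → List String
  | none, _ => []
  | some p, [] => [String.ofList [p]]
  | some p, c :: rs =>
    if String.ofList [p, c] ∈ evaDigraphs then
      String.ofList [p, c] :: tokenizeGo rs.head? rs.tail
    else
      String.ofList [p] :: tokenizeGo (some c) rs
termination_by _ l => l.length
decreasing_by all_goals simp only [List.length_tail, List.length_cons]; omega

def tokenize_eva_alt (word : String) : List String :=
  tokenizeGo word.toList.head? word.toList.tail

-- ===== PRECONDITION & SPEC =====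
def Spec_tokenize_eva (word : String) (out : List String) : Prop := out = tokenize_eva_alt word
instance (word : String) (out : List String) : Decidable (Spec_tokenize_eva word out) := by unfold Spec_tokenize_eva; infer_instance

-- ===== CLAIM (what is proved, stated in full; the proofs are below) =====
def Claim_equal_tokenize_eva : Prop := ∀ (word : String), Dom_tokenize_eva word → Spec_tokenize_eva word (tokenize_eva word)

-- ===== LEMMAS AND PROOFS =====

lemma tokenizeAux_eq_go (w : List Char) :
    ∀ n i tokens, w.length - i ≤ n →
      tokenizeAux w i tokens = tokens ++ tokenizeGo (w.drop i).head? (w.drop i).tail := by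
  intro n
  induction n with
  | zero =>
    intro i tokens h
    have hi : w.length ≤ i := by omega
    rw [tokenizeAux]
    rw [dif_neg (Nat.not_lt.mpr hi), List.drop_eq_nil_of_le hi]
    rw [List.head?_nil, List.tail_nil, tokenizeGo]
    simp
  | succ n ih =>
    intro i tokens h
    rw [tokenizeAux]
    by_cases hi : i < w.length
    · have hdrop : w.drop i = w[i] :: w.drop (i + 1) := List.drop_eq_getElem_cons hi
      by_cases h2 : i + 1 < w.length
      · have hdrop2 : w.drop (i + 1) = w[i + 1] :: w.drop (i + 2) :=
          List.drop_eq_getElem_cons h2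
        have htake : (w.drop i).take 2 = [w[i], w[i + 1]] := by
          rw [hdrop, hdrop2]; rfl
        by_cases hd : String.ofList [w[i], w[i + 1]] ∈ evaDigraphs
        · have hB : tokenizeGo (w.drop i).head? (w.drop i).tail
              = String.ofList [w[i], w[i + 1]]
                :: tokenizeGo (w.drop (i + 2)).head? (w.drop (i + 2)).tail := by
            rw [hdrop, hdrop2, List.head?_cons, List.tail_cons, tokenizeGo, if_pos hd]
          simp only [hi, dif_pos, htake, h2, hd, and_self, if_pos]
          rw [ih (i + 2) _ (by omega), hB]
          simp
        · have hcond : ¬ (i + 1 < w.length ∧ String.ofList ((w.drop i).take 2) ∈ evaDigraphs) := by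
            rw [htake]; tauto
          have hB : tokenizeGo (w.drop i).head? (w.drop i).tail
              = String.ofList [w[i]]
                :: tokenizeGo (w.drop (i + 1)).head? (w.drop (i + 1)).tail := by
            rw [hdrop, hdrop2, List.head?_cons, List.tail_cons, tokenizeGo, if_neg hd]
            rw [List.head?_cons, List.tail_cons]
          simp only [hi, dif_pos, hcond, if_neg, not_false_iff]
          rw [ih (i + 1) _ (by omega), hB]
          simp
      · have hdrop2 : w.drop (i + 1) = [] := List.drop_eq_nil_of_le (by omega)
        have hcond : ¬ (i + 1 < w.length ∧ String.ofList ((w.drop i).take 2) ∈ evaDigraphs) := by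
          tauto
        have hB : tokenizeGo (w.drop i).head? (w.drop i).tail
            = String.ofList [w[i]]
              :: tokenizeGo (w.drop (i + 1)).head? (w.drop (i + 1)).tail := by
          rw [hdrop, hdrop2, List.head?_cons, List.tail_cons, tokenizeGo]
          rw [List.head?_nil, List.tail_nil, tokenizeGo]
        simp only [hi, dif_pos, hcond, if_neg, not_false_iff]
        rw [ih (i + 1) _ (by omega), hB]
        simp
    · rw [dif_neg hi]
      have hnil : w.drop i = [] := List.drop_eq_nil_of_le (by omega)
      rw [hnil, List.head?_nil, List.tail_nil, tokenizeGo]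
      simp

-- ===== VERDICT (by name: the statement is the Claim_ definition above) =====
theorem tokenize_eva_spec : Claim_equal_tokenize_eva := by
  intro word _
  unfold Spec_tokenize_eva tokenize_eva tokenize_eva_alt
  have := tokenizeAux_eq_go word.toList word.toList.length 0 [] (by omega)
  simpa using this
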